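-- pv_equiv track=rewrite | github.com/Wisc-HCI/AQuA | Pipeline/AVscript.py | segment_text_audio
-- ===== SOURCE A (Python) =====
-- def segment_text_audio(data, words):
--     segments = []
--     temp_segment = ""
--     multiple_words = len(words) > 1
--     word_list = words
--
--     for item in data:
--         text = item['text'].strip()
--         if multiple_words:
--             if all(word in text for word in word_list):
--                 if temp_segment:
--                     segments.append({'type': 'other', 'text': temp_segment.strip()})
--                     temp_segment = ""
--                 if segments and segments[-1]['type'] == 'with':
--                     segments[-1]['text'] += " " + text
--                 else:
--                     segments.append({'type': 'with', 'text': text})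
--             else:
--                 temp_segment += " " + text
--         else:
--             if word_list[0] in text:
--                 if temp_segment:
--                     segments.append({'type': 'other', 'text': temp_segment.strip()})
--                     temp_segment = ""
--                 if segments and segments[-1]['type'] == 'with':
--                     segments[-1]['text'] += " " + text
--                 else:
--                     segments.append({'type': 'with', 'text': text})
--             else:
--                 temp_segment += " " + text
--
--     if temp_segment:
--         segments.append({'type': 'other', 'text': temp_segment.strip()})
--
--     return segments
-- ===== SOURCE B (Python) =====
-- def segment_text_audio(data, words):
--     if len(words) > 1:
--         pred = lambda t: all(w in t for w in words)
--     else: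
--         pred = lambda t: words[0] in t
--     texts = [item['text'].strip() for item in data]
--     segments = []
--     i, n = 0, len(texts)
--     while i < n:
--         b = pred(texts[i])
--         j = i + 1
--         while j < n and pred(texts[j]) == b:
--             j += 1
--         joined = " ".join(texts[i:j])
--         if b:
--             segments.append({'type': 'with', 'text': joined})
--         else:
--             segments.append({'type': 'other', 'text': joined.strip()})
--         i = j
--     return segments
-- ===== Notes on version B (the rewrite author's own statement) =====
-- stated objective: alternative
-- what changed: Replaces A's single-pass running-accumulator state machine (temp_segment buffer, flush-on-match, mutate-last-segment merging) with a two-pass group-then-map decomposition: strip all texts first, then cut the list into maximal runs of equal match-predicate and emit one labeled segment per run by joining the run's texts.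
import Mathlib
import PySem

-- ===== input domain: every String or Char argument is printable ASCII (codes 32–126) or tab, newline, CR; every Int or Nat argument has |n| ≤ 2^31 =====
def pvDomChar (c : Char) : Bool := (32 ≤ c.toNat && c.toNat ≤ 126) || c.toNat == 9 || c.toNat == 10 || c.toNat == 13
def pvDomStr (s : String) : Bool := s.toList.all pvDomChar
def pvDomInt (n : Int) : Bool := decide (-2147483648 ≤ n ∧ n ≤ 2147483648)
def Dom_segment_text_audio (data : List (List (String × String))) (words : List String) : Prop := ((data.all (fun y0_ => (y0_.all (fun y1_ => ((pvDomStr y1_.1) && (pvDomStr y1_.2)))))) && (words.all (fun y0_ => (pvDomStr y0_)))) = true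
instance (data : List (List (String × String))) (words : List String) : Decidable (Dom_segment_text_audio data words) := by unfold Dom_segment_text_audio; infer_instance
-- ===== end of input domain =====

-- B replaces A's running-accumulator state machine with a two-pass group-then-map decomposition
-- (strip all texts first, then cut the list into maximal runs of equal match-predicate and emit
-- one labeled segment per run); objective: alternative decomposition, same asymptotic cost.

-- ===== PORT A =====
-- item['text'].strip()
def aText (item : List (String × String)) : String :=
  PySem.Str.strip ((PySem.Dict.get? (PySem.Dict.mk item) "text").getD "")

-- the match test A performs on each stripped text (word_list[0] via pyGet?; none is excluded by Pre_)
def aMatch (words : List String) (text : String) : Bool :=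
  if words.length > 1 then words.all (fun w => PySem.Str.isIn w text)
  else PySem.Str.isIn ((PySem.List.pyGet? words 0).getD "") text

def withSeg (t : String) : List (String × String) := [("type", "with"), ("text", t)]
def otherSeg (t : String) : List (String × String) := [("type", "other"), ("text", t)]

-- one iteration of A's for-loop; state = (segments, temp_segment)
def aStep (words : List String) (st : List (List (String × String)) × String)
    (item : List (String × String)) : List (List (String × String)) × String :=
  let text := aText item
  if aMatch words text then
    let segs := if st.2 ≠ "" then st.1 ++ [otherSeg (PySem.Str.strip st.2)] else st.1
    let segs2 :=
      match segs.getLast? with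
      | some last =>
          if PySem.Dict.get? (PySem.Dict.mk last) "type" == some "with" then
            segs.dropLast ++
              [(PySem.Dict.modify (PySem.Dict.mk last) "text" "" (fun v => v ++ " " ++ text)).items]
          else segs ++ [withSeg text]
      | none => segs ++ [withSeg text]
    (segs2, "")
  else (st.1, st.2 ++ " " ++ text)

def segment_text_audio (data : List (List (String × String))) (words : List String) : List (List (String × String)) :=
  let r := data.foldl (aStep words) ([], "")
  if r.2 ≠ "" then r.1 ++ [otherSeg (PySem.Str.strip r.2)] else r.1

-- ===== PORT B =====
-- the per-item predicate of Source B (same expression as A's test; words[0] is looked up lazily)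
def bPred (words : List String) (t : String) : Bool :=
  if words.length > 1 then words.all (fun w => PySem.Str.isIn w t)
  else PySem.Str.isIn ((PySem.List.pyGet? words 0).getD "") t

def bText (item : List (String × String)) : String :=
  PySem.Str.strip ((PySem.Dict.get? (PySem.Dict.mk item) "text").getD "")

-- Source B's outer while loop: each pass cuts off the maximal run texts[i:j] of equal predicate
-- (the inner scan j += 1 is the takeWhile/dropWhile split) and emits one segment for it
def bLoop (p : String → Bool) : List String → List (List (String × String))
  | [] => []
  | t :: ts =>
    let b := p t
    let joined := PySem.Str.join " " (t :: ts.takeWhile (fun u => p u == b))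
    (if b then withSeg joined else otherSeg (PySem.Str.strip joined)) ::
      bLoop p (ts.dropWhile (fun u => p u == b))
  termination_by ts => ts.length
  decreasing_by
    simp only [List.length_cons]
    exact Nat.lt_succ_of_le (List.length_dropWhile_le _ ts)

def segment_text_audio_alt (data : List (List (String × String))) (words : List String) : List (List (String × String)) :=
  bLoop (bPred words) (data.map bText)

-- ===== PRECONDITION & SPEC =====
-- Pre_ excludes exactly where the Python A raises: words = [] with data nonempty (IndexError on
-- word_list[0]) and items without a 'text' key (KeyError); A returns on everything else.
def Pre_segment_text_audio (data : List (List (String × String))) (words : List String) : Prop :=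
  (data = [] ∨ words ≠ []) ∧ data.all (fun item => (PySem.Dict.mk item).contains "text") = true
instance (data : List (List (String × String))) (words : List String) : Decidable (Pre_segment_text_audio data words) := by unfold Pre_segment_text_audio; infer_instance

def pvWitness_segment_text_audio : (List (List (String × String))) × List String :=
  ([[("text", " hello there ")], [("text", "um")], [("text", "hello")]], ["hello"])

def Spec_segment_text_audio (data : List (List (String × String))) (words : List String) (out : List (List (String × String))) : Prop := out = segment_text_audio_alt data words
instance (data : List (List (String × String))) (words : List String) (out : List (List (String × String))) : Decidable (Spec_segment_text_audio data words out) := by unfold Spec_segment_text_audio; infer_instance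

-- ===== CLAIM (what is proved, stated in full; the proofs are below) =====
def Claim_equal_segment_text_audio : Prop := ∀ (data : List (List (String × String))) (words : List String), Dom_segment_text_audio data words → Pre_segment_text_audio data words → Spec_segment_text_audio data words (segment_text_audio data words)

-- ===== LEMMAS AND PROOFS =====
-- A's loop body, abstracted over the already-stripped text and the predicate
def tStep (p : String → Bool) (st : List (List (String × String)) × String)
    (text : String) : List (List (String × String)) × String :=
  if p text then
    let segs := if st.2 ≠ "" then st.1 ++ [otherSeg (PySem.Str.strip st.2)] else st.1
    let segs2 :=
      match segs.getLast? with
      | some last =>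
          if PySem.Dict.get? (PySem.Dict.mk last) "type" == some "with" then
            segs.dropLast ++
              [(PySem.Dict.modify (PySem.Dict.mk last) "text" "" (fun v => v ++ " " ++ text)).items]
          else segs ++ [withSeg text]
      | none => segs ++ [withSeg text]
    (segs2, "")
  else (st.1, st.2 ++ " " ++ text)

-- A's trailing flush
def finishA (st : List (List (String × String)) × String) : List (List (String × String)) :=
  if st.2 ≠ "" then st.1 ++ [otherSeg (PySem.Str.strip st.2)] else st.1

lemma aStep_eq_tStep (words : List String) (st : List (List (String × String)) × String)
    (item : List (String × String)) : aStep words st item = tStep (aMatch words) st (aText item) := rfl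

lemma segment_eq_finishA (data : List (List (String × String))) (words : List String) :
    segment_text_audio data words
      = finishA (List.foldl (tStep (aMatch words)) ([], "") (data.map aText)) := by
  simp only [segment_text_audio, finishA, List.foldl_map, ← aStep_eq_tStep]

-- tail of " ".join: each further text contributes ' ' followed by its characters
def spTail (l : List String) : List Char := l.flatMap (fun u => ' ' :: u.toList)

lemma inter_cons (a : List Char) (l : List (List Char)) :
    [' '].intercalate (a :: l) = a ++ l.flatMap (fun u => ' ' :: u) := by
  induction l generalizing a with
  | nil => simp [List.intercalate, List.intersperse]
  | cons b bs ih =>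
    have h : [' '].intercalate (a :: b :: bs) = a ++ [' '] ++ [' '].intercalate (b :: bs) := by
      simp [List.intercalate, List.intersperse]
    rw [h, ih b]
    simp [List.flatMap_cons]

lemma join_toList (l : List String) (t : String) :
    (PySem.Str.join " " (t :: l)).toList = t.toList ++ spTail l := by
  rw [PySem.Str.toList_join]
  have hsep : (" " : String).toList = [' '] := rfl
  rw [hsep, List.map_cons]
  simp only [PySem.Chars.join]
  rw [inter_cons]
  simp [spTail, List.flatMap_map]

lemma foldl_sp_toList (l : List String) (a : String) :
    (List.foldl (fun acc u => acc ++ " " ++ u) a l).toList = a.toList ++ spTail l := by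
  induction l generalizing a with
  | nil => simp [spTail]
  | cons r rs ih =>
    rw [List.foldl_cons, ih]
    simp [spTail, List.flatMap_cons, String.toList_append, List.append_assoc]

lemma strip_space_cons (cs : List Char) :
    PySem.Chars.strip (' ' :: cs) = PySem.Chars.strip cs := by
  simp [PySem.Chars.strip, PySem.Chars.lstrip,
        show PySem.Chars.isspace ' ' = true from rfl]

-- a mismatch run only grows temp_segment
lemma foldl_tStep_mismatch (p : String → Bool) (run : List String)
    (h : ∀ u ∈ run, p u = false) (segs : List (List (String × String))) (temp : String) :
    List.foldl (tStep p) (segs, temp) run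
      = (segs, List.foldl (fun acc u => acc ++ " " ++ u) temp run) := by
  induction run generalizing temp with
  | nil => rfl
  | cons r rs ih =>
    have hr : p r = false := h r (by simp)
    simp only [List.foldl_cons, tStep, hr]
    exact ih (fun u hu => h u (by simp [hu])) _

-- a match run extends the text of the trailing 'with' segment
lemma foldl_tStep_match (p : String → Bool) (run : List String)
    (h : ∀ u ∈ run, p u = true) (segs : List (List (String × String))) (t0 : String) :
    List.foldl (tStep p) (segs ++ [withSeg t0], "") run
      = (segs ++ [withSeg (List.foldl (fun acc u => acc ++ " " ++ u) t0 run)], "") := by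
  induction run generalizing segs t0 with
  | nil => rfl
  | cons r rs ih =>
    have hr : p r = true := h r (by simp)
    have hget : ((PySem.Dict.mk (withSeg t0)).get? "type" == some "with") = true := by
      simp [withSeg, PySem.Dict.get?]
    have hmod : ((PySem.Dict.mk (withSeg t0)).modify "text" "" (fun v => v ++ " " ++ r)).items
        = withSeg (t0 ++ " " ++ r) := by
      simp [withSeg, PySem.Dict.modify, PySem.Dict.insert, PySem.Dict.getD, PySem.Dict.get?,
            PySem.Dict.contains]
    have hstep : tStep p (segs ++ [withSeg t0], "") r = (segs ++ [withSeg (t0 ++ " " ++ r)], "") := by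
      simp [tStep, hr, hget, hmod]
    rw [List.foldl_cons, hstep]
    exact ih (fun u hu => h u (by simp [hu])) segs (t0 ++ " " ++ r)

-- the head of dropWhile fails the test
lemma dropWhile_head_false {α : Type} (q : α → Bool) (l : List α) :
    ∀ x xs, l.dropWhile q = x :: xs → q x = false := by
  induction l with
  | nil => intro x xs h; simp at h
  | cons a as ih =>
    intro x xs h
    by_cases ha : q a = true
    · rw [List.dropWhile_cons_of_pos ha] at h; exact ih x xs h
    · rw [List.dropWhile_cons_of_neg ha] at h
      cases h; simpa using ha

-- the first step of a match run from a boundary state flushes temp and opens a 'with' segment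
lemma tStep_match_boundary (p : String → Bool) (segs : List (List (String × String)))
    (temp t : String) (ht : p t = true) (hb : temp ≠ "" ∨ segs = []) :
    tStep p (segs, temp) t = (finishA (segs, temp) ++ [withSeg t], "") := by
  by_cases hT : temp = ""
  · rcases hb with hb | hb
    · exact absurd hT hb
    · subst hb; subst hT
      simp [tStep, ht, finishA]
  · have hget : ((PySem.Dict.mk (otherSeg (PySem.Str.strip temp))).get? "type"
        == some "with") = false := by
      simp [otherSeg, PySem.Dict.get?]
    simp [tStep, ht, finishA, hT, hget]

-- the boundary invariant carried between runs
def Bnd (p : String → Bool) (ts : List String) (segs : List (List (String × String)))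
    (temp : String) : Prop :=
  match ts with
  | [] => True
  | t :: _ => if p t then (temp ≠ "" ∨ segs = []) else temp = ""

lemma sp_ne_empty (t : String) (run : List String) :
    List.foldl (fun acc u => acc ++ " " ++ u) "" (t :: run) ≠ "" := by
  intro h
  have := congrArg String.toList h
  rw [foldl_sp_toList] at this
  simp [spTail, List.flatMap_cons] at this

lemma strip_fold_eq_strip_join (t : String) (run : List String) :
    PySem.Str.strip (List.foldl (fun acc u => acc ++ " " ++ u) "" (t :: run))
      = PySem.Str.strip (PySem.Str.join " " (t :: run)) := by
  apply String.toList_inj.mp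
  rw [PySem.Str.toList_strip, PySem.Str.toList_strip, foldl_sp_toList, join_toList]
  simp only [spTail, List.flatMap_cons]
  have h0 : ("" : String).toList = [] := rfl
  rw [h0, List.nil_append]
  exact strip_space_cons _

lemma fold_eq_join (t : String) (run : List String) :
    List.foldl (fun acc u => acc ++ " " ++ u) t run = PySem.Str.join " " (t :: run) := by
  apply String.toList_inj.mp
  rw [foldl_sp_toList, join_toList]

-- main invariant: from any boundary state, A's remaining loop produces exactly B's groups
lemma main_lemma (p : String → Bool) :
    ∀ (n : Nat) (ts : List String), ts.length ≤ n →
    ∀ segs temp, Bnd p ts segs temp →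
    finishA (List.foldl (tStep p) (segs, temp) ts) = finishA (segs, temp) ++ bLoop p ts := by
  intro n
  induction n with
  | zero =>
    intro ts hts segs temp _
    have : ts = [] := List.eq_nil_of_length_eq_zero (Nat.le_zero.mp hts)
    subst this; simp [bLoop]
  | succ n ih =>
    intro ts hts segs temp hbnd
    match ts with
    | [] => simp [bLoop]
    | t :: ts' =>
      have hsplit : ts'.takeWhile (fun u => p u == p t) ++ ts'.dropWhile (fun u => p u == p t)
          = ts' := List.takeWhile_append_dropWhile
      have hrunall : ∀ u ∈ ts'.takeWhile (fun u => p u == p t), p u = p t := by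
        intro u hu
        have := List.mem_takeWhile_imp hu
        simpa using this
      have hrestlen : (ts'.dropWhile (fun u => p u == p t)).length ≤ n := by
        have h1 := List.length_dropWhile_le (fun u => p u == p t) ts'
        simp only [List.length_cons] at hts
        omega
      have hfold : List.foldl (tStep p) (segs, temp) (t :: ts')
          = List.foldl (tStep p)
              (List.foldl (tStep p) (tStep p (segs, temp) t) (ts'.takeWhile (fun u => p u == p t)))
              (ts'.dropWhile (fun u => p u == p t)) := by
        conv_lhs => rw [List.foldl_cons, ← hsplit, List.foldl_append]
      cases hb : p t with
      | false =>
        have htemp : temp = "" := by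
          have h' := hbnd
          simp only [Bnd, hb, Bool.false_eq_true, if_false] at h'
          exact h'
        subst htemp
        have hstep : tStep p (segs, "") t = (segs, "" ++ " " ++ t) := by
          simp only [tStep, hb, Bool.false_eq_true, if_false]
        rw [hfold, hstep,
          foldl_tStep_mismatch p _ (fun u hu => by rw [hrunall u hu, hb]) segs _]
        have hF : List.foldl (fun acc u => acc ++ " " ++ u) ("" ++ " " ++ t)
              (ts'.takeWhile (fun u => p u == p t))
            = List.foldl (fun acc u => acc ++ " " ++ u) "" (t :: ts'.takeWhile (fun u => p u == p t)) := by
          rw [List.foldl_cons]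
        rw [hF]
        have hFne := sp_ne_empty t (ts'.takeWhile (fun u => p u == p t))
        have hbndrest : Bnd p (ts'.dropWhile (fun u => p u == p t)) segs
            (List.foldl (fun acc u => acc ++ " " ++ u) "" (t :: ts'.takeWhile (fun u => p u == p t))) := by
          cases hr : ts'.dropWhile (fun u => p u == p t) with
          | nil => trivial
          | cons r rs =>
            have hqr : (p r == p t) = false := dropWhile_head_false _ ts' r rs hr
            have hpr : p r = true := by
              cases h' : p r
              · rw [h', hb] at hqr; simp at hqr
              · rfl
            simp only [Bnd, hpr, if_pos]
            exact Or.inl hFne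
        rw [ih _ hrestlen segs _ hbndrest]
        have hfin1 : finishA (segs,
              List.foldl (fun acc u => acc ++ " " ++ u) "" (t :: ts'.takeWhile (fun u => p u == p t)))
            = segs ++ [otherSeg (PySem.Str.strip
                (List.foldl (fun acc u => acc ++ " " ++ u) "" (t :: ts'.takeWhile (fun u => p u == p t))))] := by
          unfold finishA
          rw [if_pos hFne]
        rw [hfin1, strip_fold_eq_strip_join]
        have hfin2 : finishA (segs, "") = segs := by simp [finishA]
        rw [hfin2]
        conv_rhs => rw [bLoop]
        simp [hb, List.append_assoc]
      | true =>
        have hbnd' : temp ≠ "" ∨ segs = [] := by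
          have h' := hbnd
          simp only [Bnd, hb, if_true] at h'
          exact h'
        rw [hfold, tStep_match_boundary p segs temp t hb hbnd',
          foldl_tStep_match p _ (fun u hu => by rw [hrunall u hu, hb]) _ t]
        have hbndrest : Bnd p (ts'.dropWhile (fun u => p u == p t))
            (finishA (segs, temp)
              ++ [withSeg (List.foldl (fun acc u => acc ++ " " ++ u) t (ts'.takeWhile (fun u => p u == p t)))])
            "" := by
          cases hr : ts'.dropWhile (fun u => p u == p t) with
          | nil => trivial
          | cons r rs =>
            have hqr : (p r == p t) = false := dropWhile_head_false _ ts' r rs hr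
            have hpr : p r = false := by
              cases h' : p r
              · rfl
              · rw [h', hb] at hqr; simp at hqr
            simp [Bnd, hpr]
        rw [ih _ hrestlen _ "" hbndrest]
        have hfin : finishA (finishA (segs, temp)
            ++ [withSeg (List.foldl (fun acc u => acc ++ " " ++ u) t (ts'.takeWhile (fun u => p u == p t)))], "")
            = finishA (segs, temp)
              ++ [withSeg (List.foldl (fun acc u => acc ++ " " ++ u) t (ts'.takeWhile (fun u => p u == p t)))] := by
          simp [finishA]
        rw [hfin, fold_eq_join]
        conv_rhs => rw [bLoop]
        simp [hb, List.append_assoc]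

-- ===== VERDICT (by name: the statement is the Claim_ definition above) =====
theorem segment_text_audio_spec : Claim_equal_segment_text_audio := by
  intro data words _ _
  unfold Spec_segment_text_audio
  rw [segment_eq_finishA]
  have hB : segment_text_audio_alt data words = bLoop (aMatch words) (data.map aText) := rfl
  rw [hB]
  have hbnd : Bnd (aMatch words) (data.map aText) [] "" := by
    cases h : data.map aText with
    | nil => trivial
    | cons t ts => by_cases hp : aMatch words t = true <;> simp [Bnd, hp]
  have := main_lemma (aMatch words) (data.map aText).length (data.map aText) le_rfl [] "" hbnd
  simpa [finishA] using this
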